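-- pv_equiv track=rewrite | github.com/edt-yxz-zzd/python3_src | nn_ns/graph/simple_undirected_graph.py | relabel_back
-- ===== SOURCE A (Python) =====
-- def relabel(adjacency_list, label):#new = label[old]
--     old_ls = adjacency_list
--     assert len(old_ls) == len(label)
--     old2new = label
--
--     n = len(old_ls)
--     old2new_ns = [tuple(old2new[old_v] for old_v in ns) for ns in old_ls]
--     new_ls = [None]*n
--     for old_v, new_v in enumerate(old2new):
--         new_ls[new_v] = new_neighbors = old2new_ns[old_v]
--     return tuple(new_ls)
--
-- def relabel_back(adjacency_list, label):
--     new_ls = adjacency_list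
--     assert len(new_ls) == len(label)
--     old2new = label
--     n = len(new_ls)
--
--     new2old = [None]*n
--     for old_v, new_v in enumerate(old2new):
--         new2old[new_v] = old_v
--     return relabel(new_ls, new2old)
-- ===== SOURCE B (Python) =====
-- def relabel_back(adjacency_list, label):
--     n = len(adjacency_list)
--     assert n == len(label)
--     new2old = [None] * n
--     for old_v, new_v in enumerate(label):
--         new2old[new_v] = old_v
--     return tuple(tuple(new2old[u] for u in adjacency_list[v]) for v in label)
-- ===== Notes on version B (the rewrite author's own statement) =====
-- stated objective: simpler
-- what changed: Replaces the two-function scatter pipeline (translate neighbors, then scatter rows into inverse positions via the relabel helper) by a single gather pass: build the inverse permutation once, then directly gather row label[i] and translate its neighbors through the inverse.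
import Mathlib
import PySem

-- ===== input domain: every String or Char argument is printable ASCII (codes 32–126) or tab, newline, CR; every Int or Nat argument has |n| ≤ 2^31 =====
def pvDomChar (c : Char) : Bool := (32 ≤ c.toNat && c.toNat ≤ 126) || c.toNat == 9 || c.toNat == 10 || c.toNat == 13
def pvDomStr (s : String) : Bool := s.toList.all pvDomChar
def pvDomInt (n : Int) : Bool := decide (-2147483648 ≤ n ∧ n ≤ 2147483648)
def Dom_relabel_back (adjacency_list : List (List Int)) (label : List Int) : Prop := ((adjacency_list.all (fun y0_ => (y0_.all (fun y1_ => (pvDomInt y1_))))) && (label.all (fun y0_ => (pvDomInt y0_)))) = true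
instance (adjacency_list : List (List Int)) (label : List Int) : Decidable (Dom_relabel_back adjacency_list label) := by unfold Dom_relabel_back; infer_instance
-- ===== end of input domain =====

-- B replaces A's two-function translate-then-scatter pipeline by one gather pass over the
-- inverse permutation; objective: simpler (return value only; neither version mutates its inputs).

-- ===== PORT A =====
-- 'new_ls[idx] = val' inside a for-loop: pySetD is a no-op where Python raises IndexError
-- (out of range) or TypeError (idx is None); both cases are outside Pre_.
def pvScatter {α : Type} (pairs : List (Int × α)) (acc : List α) : List α :=
  match pairs with
  | [] => acc
  | (i, y) :: rest => pvScatter rest (PySem.List.pySetD acc i y)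

-- helper 'relabel' of A, transliterated (assert failure → Python raises, outside Pre_)
def pvRelabel (adjacency_list : List (List Int)) (label : List Int) : List (List Int) :=
  if adjacency_list.length = label.length then
    let n := adjacency_list.length
    let old2new_ns := adjacency_list.map (fun ns => ns.map (fun old_v => PySem.List.pyGetD label old_v 0))
    pvScatter (label.zip old2new_ns) (List.replicate n [])
  else []

def relabel_back (adjacency_list : List (List Int)) (label : List Int) : List (List Int) :=
  if adjacency_list.length = label.length then
    let n := adjacency_list.length
    let new2old := pvScatter (label.zip ((List.range n).map (fun i => Int.ofNat i))) (List.replicate n 0)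
    pvRelabel adjacency_list new2old
  else []

-- ===== PORT B =====
def relabel_back_alt (adjacency_list : List (List Int)) (label : List Int) : List (List Int) :=
  if adjacency_list.length = label.length then
    let n := adjacency_list.length
    let new2old := pvScatter (label.zip ((List.range n).map (fun i => Int.ofNat i))) (List.replicate n 0)
    label.map (fun v =>
      (PySem.List.pyGetD adjacency_list v []).map (fun u => PySem.List.pyGetD new2old u 0))
  else []

-- ===== PRECONDITION & SPEC =====
-- Pre_: exactly the inputs where A returns: lengths match, label is a permutation of the
-- indices modulo Python's negative-index wraparound (all in range, distinct positions), and
-- every neighbor is an in-range (possibly negative) index.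
def Pre_relabel_back (adjacency_list : List (List Int)) (label : List Int) : Prop :=
  adjacency_list.length = label.length ∧
  (∀ v ∈ label, PySem.Raise.InRange adjacency_list.length v) ∧
  (label.map (PySem.List.pyIdx? adjacency_list.length)).Nodup ∧
  (∀ ns ∈ adjacency_list, ∀ u ∈ ns, PySem.Raise.InRange adjacency_list.length u)
instance (adjacency_list : List (List Int)) (label : List Int) : Decidable (Pre_relabel_back adjacency_list label) := by unfold Pre_relabel_back; infer_instance

def pvWitness_relabel_back : List (List Int) × List Int := (id [[2, -3], [3], [0], [1, -1]], id [2, 0, 3, 1])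

def Spec_relabel_back (adjacency_list : List (List Int)) (label : List Int) (out : List (List Int)) : Prop := out = relabel_back_alt adjacency_list label
instance (adjacency_list : List (List Int)) (label : List Int) (out : List (List Int)) : Decidable (Spec_relabel_back adjacency_list label out) := by unfold Spec_relabel_back; infer_instance

-- ===== CLAIM (what is proved, stated in full; the proofs are below) =====
def Claim_equal_relabel_back : Prop := ∀ (adjacency_list : List (List Int)) (label : List Int), Dom_relabel_back adjacency_list label → Pre_relabel_back adjacency_list label → Spec_relabel_back adjacency_list label (relabel_back adjacency_list label)

-- ===== LEMMAS AND PROOFS =====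

-- the position Python's xs[i] addresses for -len ≤ i < len (negative indices wrap)
def pvNorm (n : Nat) (v : Int) : Nat := (if v < 0 then v + n else v).toNat

lemma pvNorm_lt (n : Nat) (v : Int) (h : PySem.Raise.InRange n v) : pvNorm n v < n := by
  rcases h with ⟨h1, h2⟩
  unfold pvNorm
  split_ifs with hv <;> omega

lemma pyIdx?_inRange (n : Nat) (v : Int) (h : PySem.Raise.InRange n v) :
    PySem.List.pyIdx? n v = some (pvNorm n v) := by
  rcases h with ⟨h1, h2⟩
  unfold PySem.List.pyIdx? pvNorm
  by_cases hv : v < 0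
  · simp only [if_neg (show ¬ (0:Int) ≤ v by omega), if_pos (show -(n:Int) ≤ v by omega), if_pos hv]
    congr 1
    omega
  · simp only [if_pos (show (0:Int) ≤ v by omega), if_pos h2, if_neg hv]

lemma pySetD_inRange {α : Type} (xs : List α) (i : Int) (v : α)
    (h : PySem.Raise.InRange xs.length i) :
    PySem.List.pySetD xs i v = xs.set (pvNorm xs.length i) v := by
  unfold PySem.List.pySetD PySem.List.pySet?
  rw [pyIdx?_inRange _ _ h]
  rfl

lemma pyGetD_inRange {α : Type} (xs : List α) (i : Int) (d : α)
    (h : PySem.Raise.InRange xs.length i) :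
    PySem.List.pyGetD xs i d = xs.getD (pvNorm xs.length i) d := by
  unfold PySem.List.pyGetD PySem.List.pyGet?
  rw [pyIdx?_inRange _ _ h]
  simp [List.getD]

lemma pvScatter_length {α : Type} (pairs : List (Int × α)) (acc : List α) :
    (pvScatter pairs acc).length = acc.length := by
  induction pairs generalizing acc with
  | nil => rfl
  | cons p rest ih =>
      obtain ⟨i, y⟩ := p
      simp [pvScatter, ih, PySem.List.length_pySetD]

-- positions not hit by the scatter keep their value
lemma pvScatter_getD_not_mem {α : Type} (q : List Int) (ys : List α) (acc : List α) (d : α)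
    (j : Nat) (hj : j ∉ q.map (pvNorm acc.length)) :
    (pvScatter (q.zip ys) acc).getD j d = acc.getD j d := by
  induction q generalizing ys acc with
  | nil => simp [pvScatter, List.zip]
  | cons v q' ih =>
      cases ys with
      | nil => simp [pvScatter, List.zip]
      | cons y ys' =>
          simp only [List.map_cons, List.mem_cons, not_or] at hj
          obtain ⟨hj1, hj2⟩ := hj
          simp only [List.zip_cons_cons, pvScatter]
          by_cases hin : PySem.Raise.InRange acc.length v
          · rw [pySetD_inRange _ _ _ hin]
            have hlen : (acc.set (pvNorm acc.length v) y).length = acc.length := by simp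
            rw [ih ys' _ (by rw [hlen]; exact hj2)]
            rcases Nat.lt_or_ge j acc.length with hjlt | hjge
            · rw [List.getD_eq_getElem _ _ (by simpa using hjlt),
                  List.getD_eq_getElem _ _ hjlt]
              simp [Ne.symm hj1]
            · rw [List.getD_eq_default _ _ (by simpa using hjge),
                  List.getD_eq_default _ _ hjge]
          · have : PySem.List.pySetD acc v y = acc := by
              unfold PySem.List.pySetD PySem.List.pySet? PySem.List.pyIdx?
              unfold PySem.Raise.InRange at hin
              split_ifs with h1 h2 h3 <;> first | omega | rfl
            rw [this, ih ys' _ hj2]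

-- the scatter places ys[k] at position pvNorm (q[k])
lemma pvScatter_getD_eq {α : Type} (q : List Int) (ys : List α) (acc : List α)
    (hlen : q.length = ys.length)
    (hq : ∀ v ∈ q, PySem.Raise.InRange acc.length v)
    (hnd : (q.map (pvNorm acc.length)).Nodup)
    (k : Nat) (hk : k < q.length) (d' : α) :
    (pvScatter (q.zip ys) acc).getD (pvNorm acc.length (q.getD k 0)) d' = ys.getD k d' := by
  induction q generalizing ys acc k with
  | nil => simp at hk
  | cons v q' ih =>
      cases ys with
      | nil => simp at hlen
      | cons y ys' =>
          simp only [List.zip_cons_cons, pvScatter]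
          have hin : PySem.Raise.InRange acc.length v := hq v (by simp)
          rw [pySetD_inRange _ _ _ hin]
          have hlenset : (acc.set (pvNorm acc.length v) y).length = acc.length := by simp
          simp only [List.map_cons, List.nodup_cons] at hnd
          cases k with
          | zero =>
              simp only [List.getD_cons_zero]
              rw [pvScatter_getD_not_mem _ _ _ _ _ (by rw [hlenset]; exact hnd.1)]
              rw [List.getD_eq_getElem _ _ (by simpa using pvNorm_lt _ _ hin)]
              simp
          | succ k' =>
              simp only [List.getD_cons_succ]
              have h := ih ys' (acc.set (pvNorm acc.length v) y)
                (by simpa using hlen)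
                (fun w hw => by simp only [List.length_set]; exact hq w (by simp [hw]))
                (by simp only [List.length_set]; exact hnd.2)
                k' (by simpa using hk)
              simpa only [List.length_set] using h

-- every index below n occurs among the normalized labels (counting argument)
lemma pv_surj (N : List Nat) (n : Nat) (hlen : N.length = n) (hnd : N.Nodup)
    (hlt : ∀ x ∈ N, x < n) (j : Nat) (hj : j < n) : j ∈ N := by
  have hsub : N.toFinset ⊆ Finset.range n := by
    intro x hx
    simp only [Finset.mem_range]
    exact hlt x (List.mem_toFinset.mp hx)
  have hcard : (Finset.range n).card ≤ N.toFinset.card := by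
    rw [Finset.card_range, List.toFinset_card_of_nodup hnd, hlen]
  have heq : N.toFinset = Finset.range n := Finset.eq_of_subset_of_card_le hsub hcard
  have : j ∈ N.toFinset := heq ▸ Finset.mem_range.mpr hj
  exact List.mem_toFinset.mp this

-- ===== VERDICT (by name: the statement is the Claim_ definition above) =====
theorem relabel_back_spec : Claim_equal_relabel_back := by
  intro adj label _hdom hpre
  obtain ⟨hlen, hq, hndI, hadj⟩ := hpre
  unfold Spec_relabel_back relabel_back relabel_back_alt
  rw [if_pos hlen, if_pos hlen]
  simp only []
  set n := adj.length with hn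
  set inv := pvScatter (label.zip ((List.range n).map (fun i => Int.ofNat i))) (List.replicate n 0) with hinvdef
  set N := label.map (pvNorm n) with hNdef
  have hnd : N.Nodup := by
    have hcongr : label.map (PySem.List.pyIdx? n) = N.map some := by
      rw [hNdef, List.map_map]
      exact List.map_congr_left (fun v hv => by rw [pyIdx?_inRange n v (hq v hv)]; rfl)
    rw [hcongr] at hndI
    exact List.Nodup.of_map _ hndI
  have hlab : label.length = n := hlen.symm
  have hNlen : N.length = n := by simp [hNdef, hlab]
  have hNlt : ∀ x ∈ N, x < n := by
    intro x hx
    rw [hNdef] at hx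
    obtain ⟨v, hv, rfl⟩ := List.mem_map.mp hx
    exact pvNorm_lt n v (hq v hv)
  have hsurj : ∀ j < n, j ∈ N := fun j hj => pv_surj N n hNlen hnd hNlt j hj
  have hinvlen : inv.length = n := by
    rw [hinvdef, pvScatter_length, List.length_replicate]
  -- the inverse loop: inv[pvNorm n (label[k])] = k
  have hA1 : ∀ k, k < label.length → inv.getD (pvNorm n (label.getD k 0)) 0 = (k : Int) := by
    intro k hk
    have h := pvScatter_getD_eq label ((List.range n).map (fun i => Int.ofNat i))
      (List.replicate n 0)
      (by simp [hlab])
      (by intro v hv; simpa using hq v hv)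
      (by simpa using hnd)
      k hk 0
    simp only [List.length_replicate] at h
    rw [← hinvdef] at h
    rw [h, List.getD_eq_getElem _ _ (by simpa [hlab] using hk), List.getElem_map,
      List.getElem_range]
    rfl
  have hmap : ∀ (k : Nat) (hk2 : k < N.length), N[k]'hk2 = pvNorm n (label[k]'(by omega)) := by
    intro k hk2
    exact List.getElem_map _
  -- full characterisation: inv[j] = N.idxOf j for j < n
  have hchar : ∀ j, j < n → inv.getD j 0 = ((N.idxOf j : Nat) : Int) := by
    intro j hj
    have hjN : j ∈ N := hsurj j hj
    have hkN : N.idxOf j < N.length := List.idxOf_lt_length_of_mem hjN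
    have hkl : N.idxOf j < label.length := by omega
    have hNval : N[N.idxOf j]'hkN = j := List.getElem_idxOf hkN
    have hNg : pvNorm n (label.getD (N.idxOf j) 0) = j := by
      rw [List.getD_eq_getElem _ _ hkl]
      exact (hmap (N.idxOf j) hkN).symm.trans hNval
    have := hA1 (N.idxOf j) hkl
    rw [hNg] at this
    exact this
  have hinvmem : ∀ w ∈ inv, PySem.Raise.InRange n w := by
    intro w hw
    obtain ⟨p, hp, rfl⟩ := List.mem_iff_getElem.mp hw
    have hpn : p < n := by omega
    have : inv.getD p 0 = inv[p]'hp := List.getD_eq_getElem _ _ hp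
    rw [hchar p hpn] at this
    rw [← this]
    have hlt : N.idxOf p < N.length := List.idxOf_lt_length_of_mem (hsurj p hpn)
    unfold PySem.Raise.InRange
    constructor <;> omega
  have hinvnodup : (inv.map (pvNorm n)).Nodup := by
    have hform : inv.map (pvNorm n) = (List.range n).map (fun p => N.idxOf (p : Nat)) := by
      apply List.ext_getElem
      · simp [hinvlen]
      · intro p h1 h2
        simp only [List.getElem_map, List.getElem_range]
        have hpn : p < n := by simpa using h2
        have hpinv : p < inv.length := by omega
        have hval : inv[p]'hpinv = ((N.idxOf p : Nat) : Int) := by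
          rw [← List.getD_eq_getElem inv 0 hpinv]
          exact hchar p hpn
        rw [hval]
        unfold pvNorm
        rw [if_neg (by omega)]
        simp
    rw [hform]
    apply List.Nodup.map_on _ (List.nodup_range ..)
    intro x hx y hy hxy
    have hxN : (x : Nat) ∈ N := hsurj x (by simpa using hx)
    have hyN : (y : Nat) ∈ N := hsurj y (by simpa using hy)
    have h1 : N[N.idxOf x]'(List.idxOf_lt_length_of_mem hxN) = x := List.getElem_idxOf _
    have h2 : N[N.idxOf y]'(List.idxOf_lt_length_of_mem hyN) = y := List.getElem_idxOf _
    simp only [hxy] at h1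
    exact h1.symm.trans h2
  -- the inner relabel: its guard holds
  unfold pvRelabel
  rw [if_pos (by rw [hinvlen])]
  simp only []
  set ys2 := adj.map (fun ns => ns.map (fun old_v => PySem.List.pyGetD inv old_v 0)) with hys2
  -- final extensional equality
  apply List.ext_getElem
  · rw [pvScatter_length, List.length_replicate, List.length_map, hlab]
  · intro j hjA hjB
    have hjn : j < n := by
      have := hjA
      rw [pvScatter_length, List.length_replicate] at this
      exact this
    have hjl : j < label.length := by omega
    -- the position k the scatter reads row j from
    have hlabmem : label.getD j 0 ∈ label := by
      rw [List.getD_eq_getElem _ _ hjl]; exact List.getElem_mem _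
    have hkn : pvNorm n (label.getD j 0) < n := pvNorm_lt n _ (hq _ hlabmem)
    set k := pvNorm n (label.getD j 0) with hkdef
    have hkinv : k < inv.length := by omega
    have hinvk : inv.getD k 0 = (j : Int) := hA1 j hjl
    -- A side
    have hAj : (pvScatter (inv.zip ys2) (List.replicate n ([] : List Int))).getD j [] =
        ys2.getD k [] := by
      have h := pvScatter_getD_eq inv ys2 (List.replicate n ([] : List Int))
        (by simp [hys2, hinvlen, hn])
        (by intro w hw; simpa using hinvmem w hw)
        (by simpa using hinvnodup)
        k (by omega) []
      simp only [List.length_replicate] at h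
      rw [hinvk] at h
      have : pvNorm n ((j : Nat) : Int) = j := by
        unfold pvNorm
        rw [if_neg (by omega)]
        simp
      rw [this] at h
      exact h
    rw [← List.getD_eq_getElem _ ([] : List Int) hjA, hAj]
    -- B side
    have hkadj : k < adj.length := by omega
    have hBrow : PySem.List.pyGetD adj (label[j]'hjl) [] = adj[k]'hkadj := by
      rw [pyGetD_inRange adj _ [] (hq _ (List.getElem_mem _))]
      rw [List.getD_eq_getElem _ _ (by
        have : pvNorm adj.length (label[j]'hjl) = k := by
          rw [hkdef, List.getD_eq_getElem _ _ hjl]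
        omega)]
      congr 1
      rw [hkdef, List.getD_eq_getElem _ _ hjl]
    have hys2k : ys2.getD k [] =
        List.map (fun old_v => PySem.List.pyGetD inv old_v 0) (adj[k]'hkadj) := by
      rw [List.getD_eq_getElem _ _ (show k < ys2.length by rw [hys2]; simpa using hkadj)]
      exact List.getElem_map _
    rw [hys2k, List.getElem_map, hBrow]
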